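-- pv_equiv track=rewrite | github.com/SinMoonGh/jungle-algorithm | project/week2/가장_긴_증가하는_부분_수열/11053_2.py | find
-- ===== SOURCE A (Python) =====
-- def find(arr, num):
--     """이분 탐색"""
--     start = 0
--     end = len(arr)-1
--
--     while start <= end:
--         mid = (start+end)//2
--
--         if arr[mid] >= num:
--             end = mid - 1
--         elif arr[mid] < num:
--             start = mid + 1
--
--     return start
-- ===== SOURCE B (Python) =====
-- def find(arr, num):
--     """이분 탐색 — divide and conquer on slices with a base-offset accumulator"""
--     def go(sub, base):
--         if not sub:
--             return base
--         m = (len(sub) - 1) // 2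
--         if sub[m] >= num:
--             return go(sub[:m], base)
--         return go(sub[m + 1:], base + m + 1)
--     return go(arr, 0)
-- ===== Notes on version B (the rewrite author's own statement) =====
-- stated objective: alternative
-- what changed: Replaced A's iterative while-loop over a mutable (start, end) index pair by a divide-and-conquer recursion on list slices carrying a base-offset accumulator; the probe sequence and returned lower-bound index are identical.
import Mathlib
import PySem

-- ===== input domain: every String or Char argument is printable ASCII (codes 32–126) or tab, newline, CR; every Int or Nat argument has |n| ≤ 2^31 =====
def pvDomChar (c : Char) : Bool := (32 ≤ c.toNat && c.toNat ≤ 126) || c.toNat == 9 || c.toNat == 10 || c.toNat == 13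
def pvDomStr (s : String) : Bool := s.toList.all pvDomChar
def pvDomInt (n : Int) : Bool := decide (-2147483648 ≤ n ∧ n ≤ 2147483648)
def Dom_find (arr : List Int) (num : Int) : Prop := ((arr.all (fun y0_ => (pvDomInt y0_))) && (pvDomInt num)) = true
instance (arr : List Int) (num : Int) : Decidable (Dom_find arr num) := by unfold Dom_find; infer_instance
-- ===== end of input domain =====

-- B replaces A's index-pair while loop by divide-and-conquer recursion on list slices
-- with a base-offset accumulator (objective: alternative decomposition, same probe sequence).

-- ===== PORT A =====
-- A's while loop over the mutable state (start, end); the `none` branch of pyGet? is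
-- Python's IndexError — unreachable from `find`, whose initial state keeps mid in range.
def findLoop (arr : List Int) (num : Int) (start endv : Int) : Int :=
  if start ≤ endv then
    let mid := PySem.Int.floordiv (start + endv) 2
    match PySem.List.pyGet? arr mid with
    | none => start
    | some v =>
      if v ≥ num then findLoop arr num start (mid - 1)
      else findLoop arr num (mid + 1) endv
  else start
termination_by (endv + 1 - start).toNat
decreasing_by
  · rename_i hle; have := PySem.Int.floordiv_two_mid_bounds hle; omega
  · rename_i hle; have := PySem.Int.floordiv_two_mid_bounds hle; omega

def find (arr : List Int) (num : Int) : Int :=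
  findLoop arr num 0 ((arr.length : Int) - 1)

-- ===== PORT B =====
-- Source B's inner `go(sub, base)`: recursion on the slice itself; sub[m] is in range since
-- m = (len(sub)-1)//2 < len(sub), ported as pyGetD.
def findGo (num : Int) (sub : List Int) (base : Int) : Int :=
  if sub = [] then base
  else
    let m : Nat := (sub.length - 1) / 2
    if PySem.List.pyGetD sub (m : Int) 0 ≥ num then
      findGo num (PySem.List.slice sub none (some ((m : Nat) : Int))) base
    else
      findGo num (PySem.List.slice sub (some ((m + 1 : Nat) : Int)) none) (base + (m : Nat) + 1)
termination_by sub.length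
decreasing_by
  · rename_i hne _
    rw [PySem.List.slice_to_natCast]
    have : sub.length ≠ 0 := fun h => hne (List.eq_nil_of_length_eq_zero h)
    simp [List.length_take]; omega
  · rename_i hne _
    rw [PySem.List.slice_from_natCast]
    have : sub.length ≠ 0 := fun h => hne (List.eq_nil_of_length_eq_zero h)
    simp [List.length_drop]; omega

def find_alt (arr : List Int) (num : Int) : Int :=
  findGo num arr 0

-- ===== PRECONDITION & SPEC =====
def Spec_find (arr : List Int) (num : Int) (out : Int) : Prop := out = find_alt arr num
instance (arr : List Int) (num : Int) (out : Int) : Decidable (Spec_find arr num out) := by unfold Spec_find; infer_instance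

-- ===== CLAIM (what is proved, stated in full; the proofs are below) =====
def Claim_equal_find : Prop := ∀ (arr : List Int) (num : Int), Dom_find arr num → Spec_find arr num (find arr num)

-- ===== LEMMAS AND PROOFS =====

-- go on the slice arr[s : e+1] with base s computes A's loop from state (s, e).
theorem go_eq_loop (arr : List Int) (num : Int) :
    ∀ (n : Nat) (s e : Int), (e + 1 - s).toNat = n → 0 ≤ s → -1 ≤ e → e < (arr.length : Int) →
      findGo num (PySem.List.slice arr (some s) (some (e + 1))) s = findLoop arr num s e := by
  intro n
  induction n using Nat.strong_induction_on with
  | _ n ih =>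
    intro s e hn hs he hlt
    rw [PySem.List.slice_toNat arr hs (by omega)]
    by_cases hse : s ≤ e
    · -- loop body runs
      have hs' : s.toNat ≤ e.toNat := by omega
      have he' : e.toNat < arr.length := by omega
      set k : Nat := (e + 1).toNat - s.toNat with hk
      have hk1 : 1 ≤ k := by omega
      set sub : List Int := (arr.drop s.toNat).take k with hsub
      have hlen : sub.length = k := by
        simp [hsub, List.length_take, List.length_drop]; omega
      have hsubne : sub ≠ [] := by
        intro h; rw [h] at hlen; simp at hlen; omega
      set m : Nat := (sub.length - 1) / 2 with hm
      have hmk : m < k := by omega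
      have hmid : PySem.Int.floordiv (s + e) 2 = ((s.toNat + m : Nat) : Int) := by
        rw [PySem.Int.floordiv_eq_ediv_of_pos (by omega)]
        rw [hm, hlen, hk]
        omega
      have hidx : s.toNat + m < arr.length := by omega
      have hsubm : sub[m]'(by omega) = arr[s.toNat + m]'hidx := by
        simp only [hsub, List.getElem_take, List.getElem_drop]
      rw [findLoop]
      rw [if_pos hse]
      rw [findGo]
      rw [if_neg hsubne]
      simp only [hmid]
      rw [PySem.List.pyGet?_natCast]
      rw [List.getElem?_eq_getElem hidx]
      simp only [← hm]
      rw [PySem.List.pyGetD_natCast]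
      rw [List.getD_eq_getElem _ _ (by omega), hsubm]
      by_cases hge : arr[s.toNat + m]'hidx ≥ num
      · rw [if_pos hge, if_pos hge]
        rw [PySem.List.slice_to_natCast]
        have htake : sub.take m = (arr.drop s.toNat).take m := by
          rw [hsub, List.take_take]; congr 1; omega
        have := ih (((s.toNat + m : Nat) : Int) - 1 + 1 - s).toNat (by omega) s
          (((s.toNat + m : Nat) : Int) - 1) rfl hs (by omega) (by omega)
        rw [PySem.List.slice_toNat arr hs (by omega)] at this
        rw [htake]
        convert this using 3
        omega
      · rw [if_neg hge, if_neg hge]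
        rw [PySem.List.slice_from_natCast]
        have hdrop : sub.drop (m + 1) = (arr.drop (s.toNat + m + 1)).take (k - (m + 1)) := by
          rw [hsub, List.drop_take, List.drop_drop]
          congr 2
        have := ih (e + 1 - (((s.toNat + m : Nat) : Int) + 1)).toNat (by omega)
          (((s.toNat + m : Nat) : Int) + 1) e rfl (by omega) (by omega) hlt
        rw [PySem.List.slice_toNat arr (by omega) (by omega)] at this
        rw [hdrop]
        have hbase : s + (m : Int) + 1 = ((s.toNat + m : Nat) : Int) + 1 := by omega
        rw [hbase]
        convert this using 3
        omega
    · -- loop exits: the slice is empty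
      have : (e + 1).toNat - s.toNat = 0 := by omega
      rw [this]
      simp only [List.take_zero]
      rw [findGo, if_pos rfl, findLoop, if_neg hse]

-- ===== VERDICT (by name: the statement is the Claim_ definition above) =====
theorem find_spec : Claim_equal_find := by
  intro arr num _
  unfold Spec_find find find_alt
  have := go_eq_loop arr num ((arr.length : Int) - 1 + 1 - 0).toNat 0 ((arr.length : Int) - 1)
    rfl (by omega) (by omega) (by omega)
  rw [PySem.List.slice_toNat arr (by omega) (by omega)] at this
  simp at this
  exact this.symm
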